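-- pv_equiv track=rewrite | github.com/tylerthecoder/cyber-hogs-2023-ctf | rev2/scratch.py | stage1
-- ===== SOURCE A (Python) =====
-- def stage1(inp: str) -> int:
--     input = bytearray("".join(inp).encode())
--     input_len = len(input)
--     value = 0
--
--     for i in range(input_len):
--         value <<= 7
--         value ^= input[i]
--
--     return value
-- ===== SOURCE B (Python) =====
-- def stage1(inp: str) -> int:
--     data = "".join(inp).encode()
--     value = 0
--     weight = 1
--     for b in reversed(data):
--         value += b * weight
--         weight *= 128
--     return value
-- ===== Notes on version B (the rewrite author's own statement) =====
-- stated objective: alternative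
-- what changed: Replaces the forward shift-accumulator-then-xor loop by a backward pass that sums b*weight with a running base-128 place-value weight; on the covered ASCII domain every byte is < 128, so xoring a byte into the 7 freshly cleared low bits equals adding its place value.
import Mathlib
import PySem

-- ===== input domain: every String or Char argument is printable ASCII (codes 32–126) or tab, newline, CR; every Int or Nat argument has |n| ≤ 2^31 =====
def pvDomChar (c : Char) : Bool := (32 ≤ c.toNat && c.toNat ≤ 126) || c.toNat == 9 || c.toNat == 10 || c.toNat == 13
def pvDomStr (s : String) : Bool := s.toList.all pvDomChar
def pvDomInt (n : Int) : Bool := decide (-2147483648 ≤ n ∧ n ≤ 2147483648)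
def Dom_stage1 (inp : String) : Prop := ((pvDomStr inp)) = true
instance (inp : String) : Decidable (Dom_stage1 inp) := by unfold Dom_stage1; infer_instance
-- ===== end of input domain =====

-- B walks the bytes back-to-front summing b*weight with a running base-128 place-value
-- weight; on the covered ASCII domain every byte is < 128, so A's xor into the 7 freshly
-- cleared low bits is exactly this addition of place values (objective: alternative, same cost).

-- ===== PORT A =====
-- bytearray("".join(inp).encode()): "".join(inp) = inp; utf-8 bytes = char codes,
-- exact on the ASCII domain Dom_stage1.
def stage1 (inp : String) : Int :=
  let input : List Int := inp.toList.map (fun c => (c.toNat : Int))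
  -- for i in range(input_len): value <<= 7; value ^= input[i]
  input.foldl (fun value b => PySem.Int.bxor (value <<< (7 : Nat)) b) 0

-- ===== PORT B =====
-- value = 0; weight = 1; for b in reversed(data): value += b*weight; weight *= 128
def stage1_alt (inp : String) : Int :=
  let data : List Int := inp.toList.map (fun c => (c.toNat : Int))
  (data.reverse.foldl (fun (p : Int × Int) b => (p.1 + b * p.2, p.2 * 128)) (0, 1)).1

-- ===== PRECONDITION & SPEC =====
def Spec_stage1 (inp : String) (out : Int) : Prop := out = stage1_alt inp
instance (inp : String) (out : Int) : Decidable (Spec_stage1 inp out) := by unfold Spec_stage1; infer_instance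

-- ===== CLAIM (what is proved, stated in full; the proofs are below) =====
def Claim_equal_stage1 : Prop := ∀ (inp : String), Dom_stage1 inp → Spec_stage1 inp (stage1 inp)

-- ===== LEMMAS AND PROOFS =====

/-- Nat-level base-128 value of a byte list (shadow of B's recursion). -/
def pvBase : List Nat → Nat
  | [] => 0
  | b :: bs => b * 128 ^ bs.length + pvBase bs

/-- xor of a byte < 128 into the cleared low 7 bits is addition. -/
theorem pvXorAdd (v b : Nat) (h : b < 128) : (v <<< 7) ^^^ b = v * 128 + b := by
  have hb : b < 2 ^ 7 := by omega
  have hm : v * 128 + b = 2 ^ 7 * v + b := by ring_nf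
  rw [hm]
  apply Nat.eq_of_testBit_eq; intro j
  rw [Nat.testBit_two_pow_mul_add v hb j, Nat.testBit_xor, Nat.testBit_shiftLeft]
  by_cases hj : j < 7
  · have h7 : ¬ (7 ≤ j) := by omega
    simp [hj, h7]
  · have h7 : 7 ≤ j := by omega
    have hbf : b.testBit j = false :=
      Nat.testBit_eq_false_of_lt (lt_of_lt_of_le hb (Nat.pow_le_pow_right (by norm_num) h7))
    simp [hj, h7, hbf]

/-- A's Nat-level fold, started at `v`, is `v` shifted past the list plus its base-128 value. -/
theorem pvFoldBase (l : List Nat) (hl : ∀ b ∈ l, b < 128) : ∀ v : Nat,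
    l.foldl (fun value b => (value <<< 7) ^^^ b) v = v * 128 ^ l.length + pvBase l := by
  induction l with
  | nil => intro v; simp [pvBase]
  | cons b bs ih =>
    intro v
    have hb : b < 128 := hl b (List.mem_cons_self ..)
    have hbs : ∀ x ∈ bs, x < 128 := fun x hx => hl x (List.mem_cons_of_mem _ hx)
    simp only [List.foldl_cons, pvBase, List.length_cons]
    rw [ih hbs, pvXorAdd v b hb]
    ring

/-- Port A computes the cast of the Nat-level fold. -/
theorem pvStageA_cast (l : List Nat) : ∀ v : Nat,
    (l.map Int.ofNat).foldl (fun value b => PySem.Int.bxor (value <<< (7 : Nat)) b) (v : Int)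
      = ((l.foldl (fun value b => (value <<< 7) ^^^ b) v : Nat) : Int) := by
  induction l with
  | nil => intro v; simp
  | cons b bs ih =>
    intro v
    simp only [List.map_cons, List.foldl_cons, Int.ofNat_eq_natCast]
    have h1 : ((v : Int) <<< (7 : Nat)) = ((v <<< 7 : Nat) : Int) := rfl
    rw [h1, PySem.Int.bxor_natCast, ih]

/-- B's backward two-accumulator loop computes the base-128 value and the final weight. -/
theorem pvFoldB (l : List Nat) :
    ((l.map Int.ofNat).reverse.foldl (fun (p : Int × Int) b => (p.1 + b * p.2, p.2 * 128)) (0, 1))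
      = (((pvBase l : Nat) : Int), (128 : Int) ^ l.length) := by
  rw [List.foldl_reverse]
  induction l with
  | nil => simp [pvBase]
  | cons b bs ih =>
    simp only [List.map_cons, List.foldr_cons, pvBase, List.length_cons, ih]
    refine Prod.ext ?_ ?_
    · show _ = ((b * 128 ^ bs.length + pvBase bs : Nat) : Int); simp only [Int.ofNat_eq_natCast]; push_cast; ring
    · show ((128:Int) ^ bs.length * 128) = 128 ^ (bs.length + 1); ring

-- ===== VERDICT (by name: the statement is the Claim_ definition above) =====
theorem stage1_spec : Claim_equal_stage1 := by
  intro inp hdom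
  unfold Spec_stage1 stage1 stage1_alt
  simp only []
  have hmap : inp.toList.map (fun c => (c.toNat : Int))
      = (inp.toList.map Char.toNat).map Int.ofNat := by
    rw [List.map_map]; rfl
  rw [hmap]
  have hl : ∀ b ∈ inp.toList.map Char.toNat, b < 128 := by
    intro b hb
    rcases List.mem_map.mp hb with ⟨c, hc, rfl⟩
    have := List.all_eq_true.mp hdom c hc
    simp [pvDomChar] at this
    omega
  have hA := pvStageA_cast (inp.toList.map Char.toNat) 0
  simp only [Int.natCast_zero] at hA
  rw [hA, pvFoldB (inp.toList.map Char.toNat),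
    pvFoldBase (inp.toList.map Char.toNat) hl 0]
  simp
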